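-- pv_equiv track=rewrite | github.com/akikuno/DAJIN2 | misc/scripts/done/mics_extract_different_loci.py | replace_n_to_match
-- ===== SOURCE A (Python) =====
-- from copy import deepcopy
--
-- def replace_n_to_match(cssplits: list[list[str]], sequence: str) -> list[str]:
--     cssplits_replace = deepcopy(cssplits)
--     for idx, cssplit in enumerate(cssplits_replace):
--         # Replace N to @ at the left ends
--         for i, cs in enumerate(cssplit):
--             if cs != "N":
--                 break
--             cssplit[i] = "=" + sequence[i]
--         # Replace N to @ at the right ends
--         cssplit = cssplit[::-1]
--         for i, cs in enumerate(cssplit):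
--             if cs != "N":
--                 break
--             cssplit[i] = "=" + sequence[::-1][i]
--         cssplits_replace[idx] = cssplit[::-1]
--     return cssplits_replace
-- ===== SOURCE B (Python) =====
-- def _lead(row):
--     k = 0
--     for cs in row:
--         if cs != "N":
--             break
--         k += 1
--     return k
--
--
-- def replace_n_to_match(cssplits: list[list[str]], sequence: str) -> list[str]:
--     rev = sequence[::-1]
--     result = []
--     for row in cssplits:
--         n = len(row)
--         left = _lead(row)
--         if left == n:
--             result.append(["=" + sequence[i] for i in range(n)])
--         else:
--             right = _lead(row[::-1])
--             result.append([
--                 "=" + sequence[i] if i < left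
--                 else "=" + rev[n - 1 - i] if i >= n - right
--                 else cs
--                 for i, cs in enumerate(row)
--             ])
--     return result
-- ===== Notes on version B (the rewrite author's own statement) =====
-- stated objective: simpler
-- what changed: B replaces A's deepcopy plus two in-place mutate-until-break passes with a double list reversal per row by computing the two boundary N-run lengths first and then building each row in a single comprehension.
import Mathlib
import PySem

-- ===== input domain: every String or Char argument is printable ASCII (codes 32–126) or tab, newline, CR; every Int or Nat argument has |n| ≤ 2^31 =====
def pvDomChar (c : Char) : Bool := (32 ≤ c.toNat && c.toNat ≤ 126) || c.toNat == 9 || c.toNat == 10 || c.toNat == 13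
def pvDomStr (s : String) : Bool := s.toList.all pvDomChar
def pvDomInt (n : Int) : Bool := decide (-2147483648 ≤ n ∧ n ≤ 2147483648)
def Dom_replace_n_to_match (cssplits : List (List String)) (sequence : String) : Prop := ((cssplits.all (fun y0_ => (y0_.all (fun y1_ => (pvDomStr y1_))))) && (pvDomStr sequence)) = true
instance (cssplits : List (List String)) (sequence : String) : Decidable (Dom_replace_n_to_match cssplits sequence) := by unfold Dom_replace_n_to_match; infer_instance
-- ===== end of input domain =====

-- B replaces A's deepcopy + two in-place mutate-with-break passes + double reversal by
-- computing the two boundary N-run lengths first and building each row in one comprehension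
-- (objective: simpler).  Equivalence is claimed on Pre_ (sequence long enough; Python raises
-- IndexError otherwise).

-- ===== PORT A =====
-- "=" + sequence[i]: Python raises IndexError when i ≥ len(sequence); Pre_ excludes those
-- inputs, the default char here is arbitrary.  The 1-char string concat is built literally.
def pvCell (seq : List Char) (i : Nat) : String := String.ofList ['=', (seq[i]?).getD '?']

-- the inner 'for i, cs in enumerate(cssplit): if cs != "N": break; cssplit[i] = "=" + seq[i]'
-- (mutation with break = keep the rest unchanged once a non-"N" cell is met)
def pvLeftPass (seq : List Char) : Nat → List String → List String
  | _, [] => []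
  | i, cs :: rest => if cs ≠ "N" then cs :: rest else pvCell seq i :: pvLeftPass seq (i + 1) rest

-- sequence[::-1] is the reversed char list (PySem.Str.slice?_none_none_neg_one)
def replace_n_to_match (cssplits : List (List String)) (sequence : String) : List (List String) :=
  cssplits.map (fun cssplit =>
    let c1 := pvLeftPass sequence.toList 0 cssplit
    let c2 := pvLeftPass sequence.toList.reverse 0 c1.reverse
    c2.reverse)

-- ===== PORT B =====
-- _lead: count of leading "N" cells
def pvLead : List String → Nat
  | [] => 0
  | cs :: rest => if cs = "N" then pvLead rest + 1 else 0

def pvRowAlt (row : List String) (seq rev : List Char) : List String :=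
  let n := row.length
  let left := pvLead row
  if left = n then (List.range n).map (fun i => pvCell seq i)
  else
    let right := pvLead row.reverse
    (PySem.List.enumerate row).map (fun p =>
      if p.1 < (left : Int) then pvCell seq p.1.toNat
      else if (n : Int) - (right : Int) ≤ p.1 then pvCell rev (n - 1 - p.1.toNat)
      else p.2)

def replace_n_to_match_alt (cssplits : List (List String)) (sequence : String) : List (List String) :=
  let seq := sequence.toList
  let rev := seq.reverse
  cssplits.map (fun row => pvRowAlt row seq rev)

-- ===== PRECONDITION & SPEC =====
-- Pre_ excludes exactly the inputs on which Python A raises IndexError: a leading or trailing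
-- "N"-run longer than the sequence.
def Pre_replace_n_to_match (cssplits : List (List String)) (sequence : String) : Prop :=
  ∀ row ∈ cssplits,
    (row.takeWhile (fun cs => cs == "N")).length ≤ sequence.toList.length ∧
    (row.reverse.takeWhile (fun cs => cs == "N")).length ≤ sequence.toList.length
instance (cssplits : List (List String)) (sequence : String) : Decidable (Pre_replace_n_to_match cssplits sequence) := by unfold Pre_replace_n_to_match; infer_instance

def pvWitness_replace_n_to_match : List (List String) × String := ([["N", "=A", "N"], ["N", "N"]], "ACG")

def Spec_replace_n_to_match (cssplits : List (List String)) (sequence : String) (out : List (List String)) : Prop := out = replace_n_to_match_alt cssplits sequence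
instance (cssplits : List (List String)) (sequence : String) (out : List (List String)) : Decidable (Spec_replace_n_to_match cssplits sequence out) := by unfold Spec_replace_n_to_match; infer_instance

-- ===== CLAIM (what is proved, stated in full; the proofs are below) =====
def Claim_equal_replace_n_to_match : Prop := ∀ (cssplits : List (List String)) (sequence : String), Dom_replace_n_to_match cssplits sequence → Pre_replace_n_to_match cssplits sequence → Spec_replace_n_to_match cssplits sequence (replace_n_to_match cssplits sequence)

-- ===== LEMMAS AND PROOFS =====

theorem pvCell_ne_N (seq : List Char) (i : Nat) : pvCell seq i ≠ "N" := by
  intro h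
  have h2 := congrArg String.toList h
  simp [pvCell, String.toList_ofList] at h2

theorem pvLead_le_length (row : List String) : pvLead row ≤ row.length := by
  induction row with
  | nil => simp [pvLead]
  | cons cs rest ih => by_cases h : cs = "N" <;> simp [pvLead, h] <;> omega

theorem pvLead_cons_ne (cs : String) (rest : List String) (h : cs ≠ "N") :
    pvLead (cs :: rest) = 0 := by simp [pvLead, h]

theorem pvLead_append (a b : List String) :
    pvLead (a ++ b) = if pvLead a = a.length then a.length + pvLead b else pvLead a := by
  induction a with
  | nil => simp [pvLead]
  | cons cs rest ih =>
    by_cases h : cs = "N"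
    · simp only [List.cons_append, pvLead, h, if_pos, ih, List.length_cons]
      have := pvLead_le_length rest
      split_ifs <;> omega
    · simp [pvLead, h, List.length_cons]

theorem pvLeftPass_eq (seq : List Char) (row : List String) (i : Nat) :
    pvLeftPass seq i row =
      ((List.range (pvLead row)).map (fun k => pvCell seq (i + k))) ++ row.drop (pvLead row) := by
  induction row generalizing i with
  | nil => simp [pvLeftPass, pvLead]
  | cons cs rest ih =>
    by_cases h : cs = "N"
    · simp only [pvLeftPass, pvLead, h, if_pos, ite_not, if_true]
      rw [ih (i + 1), List.range_succ_eq_map]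
      simp only [List.map_cons, List.map_map, List.cons_append, List.drop_succ_cons]
      refine congrArg₂ _ (by simp) (congrArg₂ _ ?_ rfl)
      refine congrArg₂ _ (funext fun k => ?_) rfl
      simp [Function.comp]
      ring_nf
    · simp [pvLeftPass, pvLead, h]

theorem pvLeftPass_length (seq : List Char) (row : List String) (i : Nat) :
    (pvLeftPass seq i row).length = row.length := by
  rw [pvLeftPass_eq]
  have := pvLead_le_length row
  simp
  omega

theorem pvLead_eq_length_iff (row : List String) :
    pvLead row = row.length ↔ ∀ x ∈ row, x = "N" := by
  induction row with
  | nil => simp [pvLead]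
  | cons cs rest ih =>
    by_cases h : cs = "N"
    · simp [pvLead, h, ih]
    · simp only [pvLead, h, if_neg, if_false, List.length_cons]
      constructor
      · omega
      · intro hall; exact absurd (hall cs (by simp)) h

-- the non-"N" cell right after the leading run
theorem pvLead_getElem_ne (row : List String) (h : pvLead row < row.length) :
    row[pvLead row] ≠ "N" := by
  induction row with
  | nil => simp at h
  | cons cs rest ih =>
    by_cases hcs : cs = "N"
    · simp only [pvLead, hcs, if_pos, if_true] at h ⊢
      simp only [List.getElem_cons_succ]
      exact ih (by simpa using h)
    · simpa [pvLead, hcs] using hcs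

-- ===== the per-row equality =====
theorem pvRow_eq (row : List String) (seq : List Char) :
    (pvLeftPass seq.reverse 0 (pvLeftPass seq 0 row).reverse).reverse
      = pvRowAlt row seq seq.reverse := by
  set n := row.length with hn
  set L := pvLead row with hL
  have hLle : L ≤ n := pvLead_le_length row
  have hr1 : pvLeftPass seq 0 row = ((List.range L).map (fun k => pvCell seq k)) ++ row.drop L := by
    rw [pvLeftPass_eq, ← hL]; simp
  by_cases hall : L = n
  · -- all-N row
    have hdrop : row.drop L = [] := by rw [hall]; simp [hn]
    have hr1' : pvLeftPass seq 0 row = (List.range n).map (fun k => pvCell seq k) := by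
      rw [hr1, hdrop, hall]; simp
    have hzero : pvLead ((pvLeftPass seq 0 row).reverse) = 0 := by
      rcases hrev : (pvLeftPass seq 0 row).reverse with _ | ⟨x, xs⟩
      · simp [pvLead]
      · have hx : x ∈ (List.range n).map (fun k => pvCell seq k) := by
          rw [← hr1', ← List.mem_reverse, hrev]; simp
        rcases List.mem_map.1 hx with ⟨k, _, hk⟩
        exact pvLead_cons_ne x xs (hk ▸ pvCell_ne_N seq k)
    have hpass : pvLeftPass seq.reverse 0 ((pvLeftPass seq 0 row).reverse)
        = (pvLeftPass seq 0 row).reverse := by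
      rw [pvLeftPass_eq, hzero]; simp
    rw [hpass, List.reverse_reverse, hr1']
    simp [pvRowAlt, ← hL, ← hn, hall]
  · -- L < n
    have hLlt : L < n := lt_of_le_of_ne hLle hall
    -- row.drop L = row[L] :: row.drop (L+1), and row[L] ≠ "N"
    have hgetne : row[L]'(hn ▸ hLlt) ≠ "N" := pvLead_getElem_ne row (hn ▸ hLlt)
    have hdropL : row.drop L = row[L]'(hn ▸ hLlt) :: row.drop (L + 1) :=
      List.drop_eq_getElem_cons (hn ▸ hLlt)
    set R := pvLead ((row.drop L).reverse) with hR
    have hRlt : R < n - L := by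
      by_contra hcon
      have hlen : ((row.drop L).reverse).length = n - L := by simp [hn]
      have hRle := pvLead_le_length ((row.drop L).reverse)
      rw [hlen] at hRle
      have hReq : R = n - L := by omega
      have hallN := (pvLead_eq_length_iff ((row.drop L).reverse)).1 (by rw [← hR, hReq, hlen])
      have hmem : row[L]'(hn ▸ hLlt) ∈ (List.drop L row).reverse := by
        rw [List.mem_reverse, hdropL]
        exact List.mem_cons_self ..
      exact hgetne (hallN _ hmem)
    -- pvLead of row.reverse equals R
    have hlenrev : ((row.drop L).reverse).length = n - L := by simp [hn]
    have hRrev : pvLead row.reverse = R := by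
      have : row.reverse = (row.drop L).reverse ++ (row.take L).reverse := by
        rw [← List.reverse_append, List.take_append_drop]
      rw [this, pvLead_append, hlenrev, ← hR, if_neg (by omega)]
    -- pvLead of (pvLeftPass seq 0 row).reverse equals R
    have hr1rev : (pvLeftPass seq 0 row).reverse
        = (row.drop L).reverse ++ ((List.range L).map (fun k => pvCell seq k)).reverse := by
      rw [hr1, List.reverse_append]
    have hRr1 : pvLead ((pvLeftPass seq 0 row).reverse) = R := by
      rw [hr1rev, pvLead_append, hlenrev, ← hR, if_neg (by omega)]
    -- the A-side row, as take/append
    have hlen1 : (pvLeftPass seq 0 row).length = n := pvLeftPass_length seq row 0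
    have hjr : (pvLeftPass seq 0 row).reverse.drop R
        = ((pvLeftPass seq 0 row).take (n - R)).reverse := by
      rw [List.reverse_take, hlen1]
      congr 1
      omega
    have hfinal : (pvLeftPass seq.reverse 0 (pvLeftPass seq 0 row).reverse).reverse
        = (pvLeftPass seq 0 row).take (n - R)
          ++ ((List.range R).map (fun k => pvCell seq.reverse k)).reverse := by
      rw [pvLeftPass_eq, hRr1, List.reverse_append, hjr, List.reverse_reverse]
      simp
    have hB : pvRowAlt row seq seq.reverse
        = (PySem.List.enumerate row).map (fun p =>
            if p.1 < (L : Int) then pvCell seq p.1.toNat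
            else if (n : Int) - (R : Int) ≤ p.1 then pvCell seq.reverse (n - 1 - p.1.toNat)
            else p.2) := by
      simp only [pvRowAlt, ← hL, ← hn, hRrev, if_neg hall]
    rw [hfinal, hB]
    have htl : ((pvLeftPass seq 0 row).take (n - R)).length = n - R := by
      simp [hlen1]
    apply List.ext_getElem?
    intro j
    by_cases hjn : j < n
    · -- in range: both sides are 'some'
      rw [List.getElem?_map, PySem.List.getElem?_enumerate,
          List.getElem?_eq_getElem (by omega : j < row.length)]
      simp only [Option.map_some]
      by_cases hcase1 : j < n - R
      · rw [List.getElem?_append_left (by omega), List.getElem?_take_of_lt hcase1, hr1,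
            List.getElem?_append]
        by_cases hjL : j < L
        · rw [if_pos (by simpa using hjL), List.getElem?_map,
              List.getElem?_range hjL, Option.map_some]
          rw [if_pos (by push_cast; omega)]
          congr 1
          simp
        · rw [if_neg (by simpa using hjL), List.getElem?_drop]
          simp only [List.length_map, List.length_range]
          have hidx : L + (j - L) = j := by omega
          rw [hidx, List.getElem?_eq_getElem (by omega : j < row.length)]
          rw [if_neg (by push_cast; omega), if_neg (by push_cast; omega)]
      · rw [List.getElem?_append_right (by omega)]
        rw [htl]
        have hjb : j - (n - R) < (((List.range R).map (fun k => pvCell seq.reverse k))).length := by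
          simp
          omega
        rw [List.getElem?_reverse hjb]
        simp only [List.length_map, List.length_range]
        rw [List.getElem?_map, List.getElem?_range (by omega), Option.map_some]
        rw [if_neg (by push_cast; omega), if_pos (by push_cast; omega)]
        congr 2
        omega
    · -- out of range: both sides are 'none'
      rw [List.getElem?_eq_none, List.getElem?_eq_none]
      · simp [PySem.List.length_enumerate]
        omega
      · simp [htl]
        omega

-- ===== VERDICT (by name: the statement is the Claim_ definition above) =====
theorem replace_n_to_match_spec : Claim_equal_replace_n_to_match := by
  intro cssplits sequence _ _
  unfold Spec_replace_n_to_match replace_n_to_match replace_n_to_match_alt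
  simp only []
  apply List.map_congr_left
  intro row _
  exact pvRow_eq row sequence.toList
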